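-- pv_equiv track=rewrite | github.com/pri-sauce/test_contract_agent | utils/report_exporter.py | _find_line_ref
-- ===== SOURCE A (Python) =====
-- def _find_line_ref(evidence: str, original_text: str) -> int:
--     """Return approximate line number of evidence quote within clause text."""
--     if not evidence or not original_text:
--         return 0
--     key = evidence[:40].lower().strip()
--     for i, line in enumerate(original_text.split("\n"), 1):
--         if key in line.lower():
--             return i
--     return 0
-- ===== SOURCE B (Python) =====
-- def _find_line_ref(evidence: str, original_text: str) -> int:
--     """Whole-text search + newline counting instead of iterating the lines."""
--     if not evidence or not original_text:
--         return 0
--     key = evidence[:40].lower().strip()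
--     if "\n" in key:
--         # a key spanning several lines can never occur inside a single line
--         return 0
--     low = original_text.lower()
--     idx = low.find(key)
--     if idx == -1:
--         return 0
--     return low[:idx].count("\n") + 1
-- ===== Notes on version B (the rewrite author's own statement) =====
-- stated objective: alternative
-- what changed: Replaces the per-line loop (split, lower and scan each line) by one whole-text lowercase + a single find, recovering the line number by counting newlines before the match; a multi-line key is reported not-found up front since it can never occur inside one line.
import Mathlib
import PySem

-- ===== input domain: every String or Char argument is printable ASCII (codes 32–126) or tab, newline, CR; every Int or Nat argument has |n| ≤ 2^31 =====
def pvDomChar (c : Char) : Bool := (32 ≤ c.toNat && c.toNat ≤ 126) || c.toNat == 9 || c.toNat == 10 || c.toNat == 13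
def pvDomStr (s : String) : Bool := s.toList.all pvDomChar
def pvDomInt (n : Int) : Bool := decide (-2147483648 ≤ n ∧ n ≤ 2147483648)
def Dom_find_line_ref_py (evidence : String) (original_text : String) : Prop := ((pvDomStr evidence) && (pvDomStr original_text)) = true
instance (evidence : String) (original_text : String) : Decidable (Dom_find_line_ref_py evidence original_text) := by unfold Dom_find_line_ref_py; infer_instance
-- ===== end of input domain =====

-- B replaces A's per-line loop over the split text by one whole-text lowercase + a single find,
-- recovering the line number by counting newlines before the match (objective: alternative).

-- ===== PORT A =====
-- the 'for i, line in enumerate(original_text.split("\n"), 1): if key in line.lower(): return i' loop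
def findA_loop (key : List Char) : List (List Char) → Int → Int
  | [], _ => 0
  | l :: ls, i => if PySem.Chars.isIn key (PySem.Chars.lower l) then i else findA_loop key ls (i + 1)

def find_line_ref_py (evidence : String) (original_text : String) : Int :=
  if evidence.toList = [] ∨ original_text.toList = [] then 0
  else
    let key := PySem.Chars.strip (PySem.Chars.lower (PySem.Chars.slice evidence.toList none (some 40)))
    findA_loop key (PySem.Chars.splitOn original_text.toList ['\n']) 1

-- ===== PORT B =====
def find_line_ref_py_alt (evidence : String) (original_text : String) : Int :=
  if evidence.toList = [] ∨ original_text.toList = [] then 0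
  else
    let key := PySem.Chars.strip (PySem.Chars.lower (PySem.Chars.slice evidence.toList none (some 40)))
    if PySem.Chars.isIn ['\n'] key then 0
    else
      let low := PySem.Chars.lower original_text.toList
      let idx := PySem.Chars.find low key
      if idx = -1 then 0
      else (PySem.Chars.count (PySem.Chars.slice low none (some idx)) ['\n'] : Int) + 1

-- ===== PRECONDITION & SPEC =====
def Spec_find_line_ref_py (evidence : String) (original_text : String) (out : Int) : Prop := out = find_line_ref_py_alt evidence original_text
instance (evidence : String) (original_text : String) (out : Int) : Decidable (Spec_find_line_ref_py evidence original_text out) := by unfold Spec_find_line_ref_py; infer_instance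

-- ===== CLAIM (what is proved, stated in full; the proofs are below) =====
def Claim_equal_find_line_ref_py : Prop := ∀ (evidence : String) (original_text : String), Dom_find_line_ref_py evidence original_text → Spec_find_line_ref_py evidence original_text (find_line_ref_py evidence original_text)

-- ===== LEMMAS AND PROOFS =====

-- PySem.Chars.splitOn by a single character is Mathlib's List.splitOn
def consFirst (p : List Char) : List (List Char) → List (List Char)
  | [] => [p]
  | h :: t => (p ++ h) :: t

theorem splitOn_go_eq (c : Char) (fuel : Nat) (l cur : List Char) (acc : List (List Char))
    (hf : l.length ≤ fuel) :
    PySem.Chars.splitOn.go [c] fuel l cur acc = acc.reverse ++ consFirst cur.reverse (List.splitOn c l) := by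
  induction fuel generalizing l cur acc with
  | zero =>
    have hl : l = [] := List.length_eq_zero_iff.mp (Nat.le_zero.mp hf)
    subst hl
    simp [PySem.Chars.splitOn.go, List.splitOn, List.splitOnP_nil, consFirst]
  | succ f ih =>
    cases l with
    | nil => simp [PySem.Chars.splitOn.go, List.splitOn, List.splitOnP_nil, consFirst]
    | cons a rest =>
      simp only [PySem.Chars.splitOn.go]
      by_cases hac : c = a
      · subst hac
        rw [if_pos (by simp [List.isPrefixOf])]
        simp only [List.length_cons] at hf
        rw [ih _ _ _ (by simpa using hf)]
        simp only [List.splitOn, List.splitOnP_cons, beq_self_eq_true, if_pos]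
        cases hsp : List.splitOnP (fun x => x == c) rest with
        | nil => exact absurd hsp (List.splitOnP_ne_nil _ _)
        | cons h t =>
          simp only [List.length_cons, List.length_nil, List.drop_succ_cons, List.drop_zero]
          rw [hsp]; simp [consFirst]
      · rw [if_neg (by simp [List.isPrefixOf]; intro h; exact hac h)]
        simp only [List.length_cons] at hf
        rw [ih _ _ _ (by omega)]
        simp only [List.splitOn, List.splitOnP_cons]
        rw [if_neg (by simp; intro h; exact hac h.symm)]
        cases hsp : List.splitOnP (fun x => x == c) rest with
        | nil => exact absurd hsp (List.splitOnP_ne_nil _ _)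
        | cons h t => simp [consFirst]

theorem chars_splitOn_single (c : Char) (s : List Char) :
    PySem.Chars.splitOn s [c] = List.splitOn c s := by
  rw [PySem.Chars.splitOn, splitOn_go_eq c _ _ _ _ (by omega)]
  cases hsp : List.splitOn c s with
  | nil => exact absurd hsp (List.splitOnP_ne_nil _ _)
  | cons h t => simp [consFirst]

-- PySem.Chars.count of a single character is List.count
theorem count_go_eq (c : Char) (fuel : Nat) (l : List Char) (acc : Nat) (hf : l.length ≤ fuel) :
    PySem.Chars.count.go [c] fuel l acc = acc + l.count c := by
  induction fuel generalizing l acc with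
  | zero =>
    have hl : l = [] := List.length_eq_zero_iff.mp (Nat.le_zero.mp hf)
    subst hl; simp [PySem.Chars.count.go]
  | succ f ih =>
    cases l with
    | nil => simp [PySem.Chars.count.go]
    | cons a rest =>
      simp only [PySem.Chars.count.go]
      simp only [List.length_cons] at hf
      by_cases hac : c = a
      · subst hac
        rw [if_pos (by simp [List.isPrefixOf])]
        simp only [List.length_cons, List.length_nil, List.drop_succ_cons, List.drop_zero]
        rw [ih _ _ (by omega)]
        simp; omega
      · rw [if_neg (by simp [List.isPrefixOf]; intro h; exact hac h)]
        rw [ih _ _ (by omega)]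
        simp [List.count_cons]
        intro h; exact absurd h.symm hac

theorem chars_count_single (c : Char) (s : List Char) :
    PySem.Chars.count s [c] = s.count c := by
  rw [PySem.Chars.count, if_neg (by simp)]
  simpa using count_go_eq c s.length s 0 (le_refl _)

-- lowering a character yields '\n' only for '\n' itself
theorem lowerChar_eq_nl (a : Char) : PySem.Chars.lowerChar a = '\n' ↔ a = '\n' := by
  constructor
  · intro hc
    rw [PySem.Chars.lowerChar] at hc
    split at hc
    · rename_i hu
      exfalso
      rw [PySem.Chars.isupper, Bool.and_eq_true, decide_eq_true_iff, decide_eq_true_iff] at hu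
      obtain ⟨h1, h2⟩ := hu
      rw [Char.le_def, UInt32.le_iff_toNat_le] at h1 h2
      have h1' : 65 ≤ a.toNat := h1
      have h2' : a.toNat ≤ 90 := h2
      have hv : (Char.ofNat (a.toNat + 32)).toNat = a.toNat + 32 := by
        rw [Char.toNat_ofNat, if_pos]
        exact Or.inl (by omega)
      rw [hc] at hv
      have h10 : ('\n').toNat = 10 := by decide
      omega
    · exact hc
  · intro h; subst h; decide

-- lowercasing commutes with splitting on '\n'
theorem splitOnP_lower (t : List Char) :
    List.splitOnP (· == '\n') (PySem.Chars.lower t) = (List.splitOnP (· == '\n') t).map PySem.Chars.lower := by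
  induction t with
  | nil => simp [PySem.Chars.lower, List.splitOnP_nil]
  | cons a t ih =>
    simp only [PySem.Chars.lower, List.map_cons, List.splitOnP_cons] at *
    by_cases h : a = '\n'
    · subst h
      rw [if_pos (by decide), if_pos (by decide)]
      simp [ih, PySem.Chars.lower]
    · rw [if_neg (by simp [lowerChar_eq_nl]; exact h), if_neg (by simpa using h)]
      rw [ih]
      cases List.splitOnP (· == '\n') t with
      | nil => simp
      | cons hd tl => simp [PySem.Chars.lower]

-- the pieces of a split contain no separator
theorem splitOn_no_nl (t : List Char) : ∀ l ∈ List.splitOn '\n' t, '\n' ∉ l := by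
  rw [List.splitOn]
  induction t with
  | nil => simp [List.splitOnP_nil]
  | cons a t ih =>
    rw [List.splitOnP_cons]
    by_cases h : a = '\n'
    · subst h
      rw [if_pos (by simp)]
      intro l hl
      rw [List.mem_cons] at hl
      rcases hl with hl | hl
      · subst hl; simp
      · exact ih l hl
    · rw [if_neg (by simpa using h)]
      cases hsp : List.splitOnP (· == '\n') t with
      | nil => exact absurd hsp (List.splitOnP_ne_nil _ _)
      | cons hd tl =>
        intro l hl
        simp only [List.modifyHead] at hl
        rw [List.mem_cons] at hl
        rcases hl with hl | hl
        · subst hl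
          simp only [List.mem_cons]
          rintro (rfl | hmem)
          · exact h rfl
          · exact ih hd (by rw [hsp]; exact List.mem_cons_self) hmem
        · exact ih l (by rw [hsp]; exact List.mem_cons_of_mem _ hl)

-- joining the pieces back with '\n'
def joinNL : List (List Char) → List Char
  | [] => []
  | [l] => l
  | l :: ls => l ++ '\n' :: joinNL ls

theorem joinNL_eq_intercalate (L : List (List Char)) : joinNL L = ['\n'].intercalate L := by
  induction L with
  | nil => simp [joinNL, List.intercalate]
  | cons l L ih =>
    cases L with
    | nil => simp [joinNL, List.intercalate]
    | cons l' L' =>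
      rw [show joinNL (l :: l' :: L') = l ++ '\n' :: joinNL (l' :: L') from rfl, ih]
      simp [List.intercalate, List.intersperse]

-- find points at the unique first occurrence
theorem find_char (s key : List Char) (j : Nat) (h1 : key <+: s.drop j)
    (h2 : ∀ i < j, ¬ key <+: s.drop i) : PySem.Chars.find s key = (j : Int) := by
  have hin : PySem.Chars.isIn key s = true :=
    (PySem.Chars.exists_prefix_drop_iff_isIn key s).mp ⟨j, h1⟩
  have hnn : 0 ≤ PySem.Chars.find s key := by
    rw [PySem.Chars.find_nonneg_iff]
    exact (PySem.Chars.isIn_iff_infix key s).mp hin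
  obtain ⟨hpre, hmin⟩ := PySem.Chars.find_spec hnn
  have heq : (PySem.Chars.find s key).toNat = j := by
    rcases Nat.lt_trichotomy (PySem.Chars.find s key).toNat j with h | h | h
    · exact absurd hpre (h2 _ h)
    · exact h
    · exact absurd h1 (hmin j h)
  omega

theorem drop_append_ge (l m : List Char) (j : Nat) (h : l.length ≤ j) :
    (l ++ m).drop j = m.drop (j - l.length) := by
  rw [List.drop_append]
  simp [List.drop_eq_nil_of_le h]

-- an occurrence of a newline-free key cannot cross the '\n' separator
theorem noCross (key l s' : List Char) (hk : '\n' ∉ key) (j : Nat)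
    (h : key <+: (l ++ '\n' :: s').drop j) :
    key <+: l.drop j ∨ (l.length + 1 ≤ j ∧ key <+: s'.drop (j - (l.length + 1))) := by
  by_cases hj : j ≤ l.length
  · left
    rw [List.drop_append_of_le_length hj] at h
    by_cases hlen : key.length ≤ l.length - j
    · exact List.prefix_of_prefix_length_le h (List.prefix_append _ _) (by simpa using hlen)
    · exfalso
      have hA : l.drop j <+: key := by
        apply List.prefix_of_prefix_length_le (List.prefix_append _ _) h
        simp; omega
      obtain ⟨u, hu⟩ := hA
      have hu' : key <+: l.drop j ++ '\n' :: s' := h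
      rw [← hu] at hu'
      have husuf : u <+: '\n' :: s' := (List.prefix_append_right_inj _).mp hu'
      cases u with
      | nil =>
        rw [List.append_nil] at hu
        apply hlen; rw [← hu]; simp
      | cons b u' =>
        have hb : b = '\n' := by
          obtain ⟨t, ht⟩ := husuf
          simpa using congrArg (·.head?) ht
        apply hk
        rw [← hu, hb]
        simp
  · right
    have hj' : l.length + 1 ≤ j := by omega
    refine ⟨hj', ?_⟩
    have hd : (l ++ '\n' :: s').drop j = s'.drop (j - (l.length + 1)) := by
      rw [drop_append_ge _ _ _ (by omega)]
      have h2 : j - l.length = (j - (l.length + 1)) + 1 := by omega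
      rw [h2, List.drop_succ_cons]
    rwa [hd] at h

-- A's loop with each line pre-lowered
def firstIdx (key : List Char) : List (List Char) → Int → Int
  | [], _ => 0
  | l :: ls, i => if PySem.Chars.isIn key l then i else firstIdx key ls (i + 1)

theorem findA_eq_firstIdx (key : List Char) (L : List (List Char)) (i : Int) :
    findA_loop key L i = firstIdx key (L.map PySem.Chars.lower) i := by
  induction L generalizing i with
  | nil => rfl
  | cons l L ih => simp only [findA_loop, List.map_cons, firstIdx, ih]

theorem lower_no_nl (l : List Char) (h : '\n' ∉ l) : '\n' ∉ PySem.Chars.lower l := by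
  intro hm
  rw [PySem.Chars.lower, List.mem_map] at hm
  obtain ⟨a, ha, hla⟩ := hm
  exact h ((lowerChar_eq_nl a).mp hla ▸ ha)

theorem firstIdx_of_nl (key : List Char) (L : List (List Char)) (i : Int)
    (hk : '\n' ∈ key) (h : ∀ l ∈ L, '\n' ∉ l) : firstIdx key L i = 0 := by
  induction L generalizing i with
  | nil => rfl
  | cons l L ih =>
    simp only [firstIdx]
    rw [if_neg, ih _ (fun x hx => h x (List.mem_cons_of_mem _ hx))]
    intro ht
    exact h l List.mem_cons_self (((PySem.Chars.isIn_iff_infix key l).mp ht).sublist.mem hk)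

theorem isIn_of_drop_prefix (key l : List Char) (j : Nat) (h : key <+: l.drop j) :
    PySem.Chars.isIn key l = true :=
  (PySem.Chars.exists_prefix_drop_iff_isIn key l).mp ⟨j, h⟩

theorem count_take_of_not_mem (l : List Char) (j : Nat) (h : '\n' ∉ l) :
    (l.take j).count '\n' = 0 :=
  List.count_eq_zero.mpr (fun hm => h (List.mem_of_mem_take hm))

-- the heart: the first line containing a newline-free key is recovered by find + newline count
theorem core (key : List Char) (hk : '\n' ∉ key) :
    ∀ (L : List (List Char)) (i : Int), L ≠ [] → (∀ l ∈ L, '\n' ∉ l) →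
    firstIdx key L i =
      if PySem.Chars.find (joinNL L) key = -1 then 0
      else i + (((joinNL L).take (PySem.Chars.find (joinNL L) key).toNat).count '\n' : Int) := by
  intro L
  induction L with
  | nil => intro i h; exact absurd rfl h
  | cons l L' ih =>
    intro i _ hnl
    have hl : '\n' ∉ l := hnl l List.mem_cons_self
    cases L' with
    | nil =>
      simp only [joinNL, firstIdx]
      by_cases ht : PySem.Chars.isIn key l = true
      · have hnn : 0 ≤ PySem.Chars.find l key := by
          rw [PySem.Chars.find_nonneg_iff]
          exact (PySem.Chars.isIn_iff_infix key l).mp ht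
        rw [if_pos ht, if_neg (by omega)]
        rw [count_take_of_not_mem l _ hl]
        simp
      · rw [if_neg ht, if_pos]
        rw [PySem.Chars.find_eq_neg_one_iff]
        intro hinf
        exact ht ((PySem.Chars.isIn_iff_infix key l).mpr hinf)
    | cons l2 L'' =>
      have hs : joinNL (l :: l2 :: L'') = l ++ '\n' :: joinNL (l2 :: L'') := rfl
      set s' := joinNL (l2 :: L'') with hs'
      rw [hs]
      rw [show firstIdx key (l :: l2 :: L'') i
            = if PySem.Chars.isIn key l then i else firstIdx key (l2 :: L'') (i + 1) from rfl]
      by_cases ht : PySem.Chars.isIn key l = true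
      · rw [if_pos ht]
        have hnn : 0 ≤ PySem.Chars.find l key := by
          rw [PySem.Chars.find_nonneg_iff]
          exact (PySem.Chars.isIn_iff_infix key l).mp ht
        obtain ⟨hpre, hmin⟩ := PySem.Chars.find_spec hnn
        have hle : (PySem.Chars.find l key).toNat ≤ l.length := by
          have := PySem.Chars.find_le_length l key
          omega
        set f := (PySem.Chars.find l key).toNat with hf
        have hfind : PySem.Chars.find (l ++ '\n' :: s') key = (f : Int) := by
          apply find_char
          · rw [List.drop_append_of_le_length hle]
            exact hpre.trans (List.prefix_append _ _)
          · intro i' hi' hp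
            rcases noCross key l s' hk i' hp with hc | ⟨hc, _⟩
            · exact hmin i' hi' hc
            · omega
        rw [hfind, if_neg (by omega)]
        simp only [Int.toNat_natCast]
        rw [List.take_append_of_le_length hle]
        rw [count_take_of_not_mem l _ hl]
        simp
      · rw [if_neg ht]
        rw [ih (i + 1) (by simp) (fun x hx => hnl x (List.mem_cons_of_mem _ hx))]
        by_cases hf' : PySem.Chars.find s' key = -1
        · rw [if_pos hf', if_pos]
          rw [PySem.Chars.find_eq_neg_one_iff]
          intro hinf
          obtain ⟨j, hj⟩ := (PySem.Chars.exists_prefix_drop_iff_isIn key _).mpr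
            ((PySem.Chars.isIn_iff_infix key _).mpr hinf)
          rcases noCross key l s' hk j hj with hc | ⟨_, hc⟩
          · exact ht (isIn_of_drop_prefix key l j hc)
          · rw [PySem.Chars.find_eq_neg_one_iff] at hf'
            exact hf' ((PySem.Chars.isIn_iff_infix key s').mp (isIn_of_drop_prefix key s' _ hc))
        · rw [if_neg hf']
          have hnn' : 0 ≤ PySem.Chars.find s' key := by
            have h1 := PySem.Chars.neg_one_le_find s' key
            have h2 : PySem.Chars.find s' key ≠ -1 := hf'
            omega
          obtain ⟨hpre', hmin'⟩ := PySem.Chars.find_spec hnn'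
          set f' := (PySem.Chars.find s' key).toNat with hff
          have hfind : PySem.Chars.find (l ++ '\n' :: s') key = ((l.length + 1 + f' : Nat) : Int) := by
            apply find_char
            · rw [drop_append_ge _ _ _ (by omega)]
              have : l.length + 1 + f' - l.length = f' + 1 := by omega
              rw [this, List.drop_succ_cons]
              exact hpre'
            · intro i' hi' hp
              rcases noCross key l s' hk i' hp with hc | ⟨hc, hc2⟩
              · exact ht (isIn_of_drop_prefix key l i' hc)
              · exact hmin' _ (by omega) hc2
          rw [hfind, if_neg (by omega)]
          have htake : (l ++ '\n' :: s').take (l.length + 1 + f') = l ++ '\n' :: s'.take f' := by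
            rw [List.take_append]
            congr 1
            · exact List.take_of_length_le (by omega)
            · have : l.length + 1 + f' - l.length = f' + 1 := by omega
              rw [this, List.take_succ_cons]
          have hnat : ((l.length + 1 + f' : Nat) : Int).toNat = l.length + 1 + f' := by omega
          rw [hnat, htake]
          have hcl : l.count '\n' = 0 := List.count_eq_zero.mpr hl
          rw [List.count_append, List.count_cons, hcl]
          simp only [BEq.rfl, if_true]
          push_cast
          ring

-- ===== VERDICT (by name: the statement is the Claim_ definition above) =====
theorem find_line_ref_py_spec : Claim_equal_find_line_ref_py := by
  intro ev t _
  unfold Spec_find_line_ref_py find_line_ref_py find_line_ref_py_alt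
  by_cases hg : ev.toList = [] ∨ t.toList = []
  · rw [if_pos hg, if_pos hg]
  · rw [if_neg hg, if_neg hg]
    simp only []
    set key := PySem.Chars.strip (PySem.Chars.lower (PySem.Chars.slice ev.toList none (some 40))) with hkey
    by_cases hknl : PySem.Chars.isIn ['\n'] key = true
    · rw [if_pos hknl]
      have hmem : '\n' ∈ key := by
        have := (PySem.Chars.isIn_iff_infix ['\n'] key).mp hknl
        exact this.sublist.mem (List.mem_singleton.mpr rfl)
      rw [chars_splitOn_single, findA_eq_firstIdx]
      apply firstIdx_of_nl _ _ _ hmem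
      intro l hl
      rw [List.mem_map] at hl
      obtain ⟨p, hp, hlp⟩ := hl
      exact hlp ▸ lower_no_nl p (splitOn_no_nl t.toList p hp)
    · rw [if_neg hknl]
      have hk : '\n' ∉ key := by
        intro hmem
        apply hknl
        rw [PySem.Chars.isIn_iff_infix]
        obtain ⟨s1, s2, hsp⟩ := List.append_of_mem hmem
        exact ⟨s1, s2, by rw [hsp]; simp⟩
      rw [chars_splitOn_single, findA_eq_firstIdx]
      have hmap : (List.splitOn '\n' t.toList).map PySem.Chars.lower
          = List.splitOn '\n' (PySem.Chars.lower t.toList) := by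
        simp only [List.splitOn]
        exact (splitOnP_lower t.toList).symm
      rw [hmap]
      set low := PySem.Chars.lower t.toList with hlow
      have hjoin : joinNL (List.splitOn '\n' low) = low := by
        rw [joinNL_eq_intercalate]
        exact List.intercalate_splitOn low '\n'
      rw [core key hk (List.splitOn '\n' low) 1 (List.splitOnP_ne_nil _ _) (splitOn_no_nl low), hjoin]
      by_cases hf : PySem.Chars.find low key = -1
      · rw [if_pos hf, if_pos hf]
      · rw [if_neg hf, if_neg hf]
        have hnn : 0 ≤ PySem.Chars.find low key := by
          have h1 := PySem.Chars.neg_one_le_find low key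
          have h2 : PySem.Chars.find low key ≠ -1 := hf
          omega
        rw [PySem.Chars.slice_eq_listSlice, PySem.List.slice_to low hnn, chars_count_single]
        ring
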